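-- pv_equiv track=rewrite | github.com/loren-jiang/hitsDB | my_utils/utility_functions.py | priority_interleave
-- ===== SOURCE A (Python) =====
-- from collections import defaultdict
--
-- def group_list_by(lst, attrs, separator='_'):
--     if lst:
--         if type(lst[0]) is dict:
--             return group_dicts_list_by(lst, attrs, separator)
--         else:
--             return group_objs_lists_by(lst, attrs, separator)
--     else:
--         return lst
--
-- def group_dicts_list_by(lst, attrs, separator='_'):
--     groups = defaultdict(list)
--     for obj in lst:
--         keys = [str(obj.get(attr, '')) for attr in attrs]
--         cleaned_key  = separator.join(keys)
--         groups[cleaned_key].append(obj)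
--     return groups
--
-- def group_objs_lists_by(lst, attrs, separator='_'):
--     groups = defaultdict(list)
--     for obj in lst:
--         keys = [str(getattr(obj, attr, '')) for attr in attrs]
--         cleaned_key  = separator.join(keys)
--         groups[cleaned_key].append(obj)
--     return groups
--
-- def get_max_len(lsts):
--     return max(list(map(lambda lst: len(lst), lsts)))
--
-- def interleave(lsts):
--     """
--     Takes n lists and interleaves them. If one list is longer, then the remainder of that list is appended
--     """
--     max_len = get_max_len(lsts)
--
--     lsts = list(map(lambda x: none_pad(x, max_len), lsts))
--     ret = []
--     for k in range(max_len):
--         temp = list(map(lambda x: x[k], lsts))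
--         ret.extend(temp)
--     return remove_falsey_values(ret)
--
-- def priority_interleave(lsts, priority_range=None, is_lst_of_dicts=False):
--     if priority_range:
--         ret = []
--         for p in [str(k) for k in priority_range]:
--             sublist = []
--             for el in list(map( lambda x: group_list_by(x, ['priority']), lsts)):
--                 x = el.get(p, None)
--                 if x:
--                     sublist.append(x)
--             if sublist:
--                 ret.extend(interleave(sublist))
--         return ret
--     else:
--         return(interleave(lsts))
--
-- def remove_falsey_values(lst):
--     """
--     Remove values that evaluate to false from lst
--     """
--     return list(filter(lambda x: x, lst))
--
-- def none_pad(lst, k):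
--     """
--     'None' pad list to desired length k
--     """
--     diff = k - len(lst)
--     assert diff >= 0
--     lst += [None] * (diff)
--     return lst
-- ===== SOURCE B (Python) =====
-- def priority_interleave(lsts, priority_range=None, is_lst_of_dicts=False):
--     if priority_range:
--         # group each list by priority ONCE, then one dict lookup per priority
--         grouped = []
--         for x in lsts:
--             g = {}
--             for obj in x:
--                 g.setdefault(str(obj.get('priority', '')), []).append(obj)
--             grouped.append(g)
--         ret = []
--         for p in priority_range:
--             sp = str(p)
--             sub = [g[sp] for g in grouped if g.get(sp)]
--             ret.extend(_round_robin(sub))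
--         return ret
--     else:
--         return _round_robin(lsts)
--
--
-- def _round_robin(lsts):
--     # column-major walk without padding; drops falsey elements on the fly
--     ret = []
--     for k in range(max(map(len, lsts), default=0)):
--         for l in lsts:
--             if k < len(l) and l[k]:
--                 ret.append(l[k])
--     return ret
-- ===== Notes on version B (the rewrite author's own statement) =====
-- stated objective: faster
-- what changed: B groups each list by priority once before the priority loop (A calls group_list_by on every list for every priority) and interleaves with a pad-free round-robin walk that skips falsey elements on the fly instead of None-padding, reading columns and filtering at the end.
-- crash fix: A raises AttributeError when priority_range is truthy and some inner list is empty (group_list_by returns a list, which has no .get), and ValueError (max of empty sequence) when priority_range is falsy and lsts is empty; B returns the interleaving with the empty pieces skipped ([] in the latter case). — e.g. on priority_interleave([[], [[("priority", 1)]]], some [1], false): A raises AttributeError, B returns [[("priority", 1)]]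
import Mathlib
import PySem

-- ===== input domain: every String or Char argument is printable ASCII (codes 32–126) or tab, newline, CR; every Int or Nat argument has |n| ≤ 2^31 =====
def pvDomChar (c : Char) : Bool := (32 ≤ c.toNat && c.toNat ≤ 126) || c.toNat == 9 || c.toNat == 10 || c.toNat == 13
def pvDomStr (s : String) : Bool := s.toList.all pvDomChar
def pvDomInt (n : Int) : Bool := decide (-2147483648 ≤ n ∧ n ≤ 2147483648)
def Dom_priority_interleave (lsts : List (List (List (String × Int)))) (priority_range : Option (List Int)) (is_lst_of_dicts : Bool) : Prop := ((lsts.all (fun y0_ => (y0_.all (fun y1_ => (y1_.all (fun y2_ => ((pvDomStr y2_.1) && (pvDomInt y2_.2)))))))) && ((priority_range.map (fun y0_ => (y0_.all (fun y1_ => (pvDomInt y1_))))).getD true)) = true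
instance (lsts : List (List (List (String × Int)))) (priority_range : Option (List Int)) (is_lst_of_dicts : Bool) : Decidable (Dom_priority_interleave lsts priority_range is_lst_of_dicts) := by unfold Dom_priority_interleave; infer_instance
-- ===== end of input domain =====

-- B groups each list by priority once before the priority loop (A regroups every list for every
-- priority) and interleaves by a pad-free round-robin walk: asymptotically faster, same return value.
-- A additionally pads the caller's inner lists with None in place in the no-priority branch (a side
-- effect B does not perform); the equivalence proved here is about the RETURN value.

-- ===== PORT A =====
-- str(obj.get('priority', ''))
def pvKeyA (obj : List (String × Int)) : String :=
  match (PySem.Dict.mk obj).get? "priority" with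
  | some v => PySem.Int.toStr v
  | none => ""

-- group_dicts_list_by(x, ['priority']) (each obj is a dict, so group_list_by takes this branch)
def pvGroupA (x : List (List (String × Int))) : PySem.Dict String (List (List (String × Int))) :=
  x.foldl (fun g obj => g.modify (pvKeyA obj) [] (fun l => l ++ [obj])) PySem.Dict.empty

-- interleave: None-pad every list to the max length, read column-major, drop falsey values at the end.
-- Python's max raises on an empty argument; that input is excluded by Pre_, so the .getD 0 is unreachable there.
def pvInterleaveA (lsts : List (List (List (String × Int)))) : List (List (String × Int)) :=
  let maxLen := (PySem.List.max? (lsts.map List.length) (fun y => y)).getD 0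
  let padded := lsts.map (fun x => x.map some ++ List.replicate (maxLen - x.length) none)
  let ret := (List.range maxLen).foldl
    (fun ret k => ret ++ padded.map (fun x => x.getD k none))
    ([] : List (Option (List (String × Int))))
  ret.filterMap (fun o => match o with
    | some l => if l.isEmpty then none else some l
    | none => none)

def priority_interleave (lsts : List (List (List (String × Int)))) (priority_range : Option (List Int)) (is_lst_of_dicts : Bool) : List (List (String × Int)) :=
  match priority_range with
  | some pr =>
      if pr.isEmpty then pvInterleaveA lsts   -- 'if priority_range:' is False for []
      else
        pr.foldl (fun ret k =>
          let p := PySem.Int.toStr k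
          let sublist := lsts.foldl (fun sub x =>
            match (pvGroupA x).get? p with
            | some g => if g.isEmpty then sub else sub ++ [g]   -- 'if x:'
            | none => sub) []
          if sublist.isEmpty then ret else ret ++ pvInterleaveA sublist) []
  | none => pvInterleaveA lsts

-- ===== PORT B =====
-- g.setdefault(str(obj.get('priority', '')), []).append(obj)
def pvGroupB (x : List (List (String × Int))) : PySem.Dict String (List (List (String × Int))) :=
  x.foldl (fun g obj =>
    let k := match (PySem.Dict.mk obj).get? "priority" with
      | some v => PySem.Int.toStr v
      | none => ""
    (g.setdefault k []).modify k [] (fun l => l ++ [obj])) PySem.Dict.empty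

-- _round_robin: column-major walk without padding, skipping falsey elements on the fly
def pvRoundRobin (lsts : List (List (List (String × Int)))) : List (List (String × Int)) :=
  let m := PySem.List.maxD (lsts.map List.length) (fun y => y) 0
  (List.range m).foldl (fun ret k =>
    lsts.foldl (fun ret l =>
      match l[k]? with
      | some e => if e.isEmpty then ret else ret ++ [e]   -- 'if k < len(l) and l[k]:'
      | none => ret) ret) []

def priority_interleave_alt (lsts : List (List (List (String × Int)))) (priority_range : Option (List Int)) (is_lst_of_dicts : Bool) : List (List (String × Int)) :=
  match priority_range with
  | some pr =>
      if pr.isEmpty then pvRoundRobin lsts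
      else
        let grouped := lsts.map pvGroupB
        pr.foldl (fun ret p =>
          let sp := PySem.Int.toStr p
          let sub := grouped.filterMap (fun g =>
            match g.get? sp with
            | some l => if l.isEmpty then none else some l   -- 'if g.get(sp)'
            | none => none)
          ret ++ pvRoundRobin sub) []
  | none => pvRoundRobin lsts

-- ===== PRECONDITION & SPEC =====
-- Pre_ excludes exactly the inputs where the Python A raises: with a truthy priority_range an empty
-- inner list makes group_list_by return a list and 'el.get' raise AttributeError; with a falsy
-- priority_range an empty lsts makes max() in interleave raise ValueError.
def pvTruthy (o : Option (List Int)) : Bool :=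
  match o with
  | some (_ :: _) => true
  | _ => false

def Pre_priority_interleave (lsts : List (List (List (String × Int)))) (priority_range : Option (List Int)) (is_lst_of_dicts : Bool) : Prop :=
  if pvTruthy priority_range then ∀ x ∈ lsts, x ≠ [] else lsts ≠ []
instance (lsts : List (List (List (String × Int)))) (priority_range : Option (List Int)) (is_lst_of_dicts : Bool) : Decidable (Pre_priority_interleave lsts priority_range is_lst_of_dicts) := by unfold Pre_priority_interleave; infer_instance

def pvWitness_priority_interleave : (List (List (List (String × Int)))) × Option (List Int) × Bool :=
  ([[[("priority", 1)], [("priority", 2)]], [[("priority", 2)]]], some [2, 1], false)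

-- On inputs outside Pre_ the Python A raises (AttributeError / ValueError as above) while B returns the interleaving with the offending empty pieces simply skipped.
def Raises_priority_interleave (lsts : List (List (List (String × Int)))) (priority_range : Option (List Int)) (is_lst_of_dicts : Bool) : Prop :=
  if pvTruthy priority_range then ∃ x ∈ lsts, x = [] else lsts = []
instance (lsts : List (List (List (String × Int)))) (priority_range : Option (List Int)) (is_lst_of_dicts : Bool) : Decidable (Raises_priority_interleave lsts priority_range is_lst_of_dicts) := by unfold Raises_priority_interleave; infer_instance

def pvRaiseWitness_priority_interleave : (List (List (List (String × Int)))) × Option (List Int) × Bool :=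
  ([[], [[("priority", 1)]]], some [1], false)
def pvRaiseWitnessOut_priority_interleave : List (List (String × Int)) := [[("priority", 1)]]

def Spec_priority_interleave (lsts : List (List (List (String × Int)))) (priority_range : Option (List Int)) (is_lst_of_dicts : Bool) (out : List (List (String × Int))) : Prop := out = priority_interleave_alt lsts priority_range is_lst_of_dicts
instance (lsts : List (List (List (String × Int)))) (priority_range : Option (List Int)) (is_lst_of_dicts : Bool) (out : List (List (String × Int))) : Decidable (Spec_priority_interleave lsts priority_range is_lst_of_dicts out) := by unfold Spec_priority_interleave; infer_instance

-- ===== CLAIM (what is proved, stated in full; the proofs are below) =====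
def Claim_equal_priority_interleave : Prop := ∀ (lsts : List (List (List (String × Int)))) (priority_range : Option (List Int)) (is_lst_of_dicts : Bool), Dom_priority_interleave lsts priority_range is_lst_of_dicts → Pre_priority_interleave lsts priority_range is_lst_of_dicts → Spec_priority_interleave lsts priority_range is_lst_of_dicts (priority_interleave lsts priority_range is_lst_of_dicts)

def Claim_raises_priority_interleave : Prop := (∀ (lsts : List (List (List (String × Int)))) (priority_range : Option (List Int)) (is_lst_of_dicts : Bool), Dom_priority_interleave lsts priority_range is_lst_of_dicts → Raises_priority_interleave lsts priority_range is_lst_of_dicts → ¬ Pre_priority_interleave lsts priority_range is_lst_of_dicts) ∧ (Dom_priority_interleave (pvRaiseWitness_priority_interleave.1) (pvRaiseWitness_priority_interleave.2.1) (pvRaiseWitness_priority_interleave.2.2) ∧ Raises_priority_interleave (pvRaiseWitness_priority_interleave.1) (pvRaiseWitness_priority_interleave.2.1) (pvRaiseWitness_priority_interleave.2.2) ∧ priority_interleave_alt (pvRaiseWitness_priority_interleave.1) (pvRaiseWitness_priority_interleave.2.1) (pvRaiseWitness_priority_interleave.2.2) = pvRaiseWitnessOut_priority_interleave)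

-- ===== LEMMAS AND PROOFS =====

theorem pi_setdefault_modify (g : PySem.Dict String (List (List (String × Int)))) (k : String)
    (f : List (List (String × Int)) → List (List (String × Int))) :
    (g.setdefault k []).modify k [] f = g.modify k [] f := by
  by_cases hc : g.contains k = true
  · rw [PySem.Dict.setdefault_of_contains g [] hc]
  · rw [PySem.Dict.setdefault_of_not_contains g [] (by simpa using hc)]
    simp [PySem.Dict.modify, PySem.Dict.getD_insert_self, PySem.Dict.insert_insert_self,
      PySem.Dict.getD_of_not_contains _ _ (by simpa using hc : g.contains k = false)]

theorem pi_group_eq (x : List (List (String × Int))) : pvGroupB x = pvGroupA x := by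
  unfold pvGroupA pvGroupB pvKeyA
  congr 1
  funext g obj
  exact pi_setdefault_modify g _ _

-- a fold that appends a block per element is the concatenation of the blocks
theorem pi_fold_app {α β : Type} (step : List β → α → List β) (f : α → List β)
    (h : ∀ ret x, step ret x = ret ++ f x) (l : List α) (init : List β) :
    l.foldl step init = init ++ l.flatMap f := by
  have hs : step = fun ret x => ret ++ f x := by funext r x; exact h r x
  rw [hs, PySem.List.foldl_append_eq_flatMap]

-- the per-column selection both interleaves compute
def pvCol (k : Nat) (l : List (List (String × Int))) : List (List (String × Int)) :=
  match l[k]? with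
  | some e => if e.isEmpty then [] else [e]
  | none => []

theorem pi_pad_col (m k : Nat) (hk : k < m) (x : List (List (String × Int))) (hx : x.length ≤ m) :
    ((fun o : Option (List (String × Int)) => match o with
      | some l => if l.isEmpty then none else some l
      | none => none) ((x.map some ++ List.replicate (m - x.length) (none : Option (List (String × Int)))).getD k none)).toList
    = pvCol k x := by
  unfold pvCol
  by_cases hkx : k < x.length
  · rw [List.getD_eq_getElem?_getD, List.getElem?_append_left (by simpa using hkx)]
    simp [hkx]
    split <;> simp
  · rw [List.getD_eq_getElem?_getD, List.getElem?_append_right (by simpa using Nat.le_of_not_lt hkx)]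
    simp [List.getElem?_replicate]
    have hlt : k - x.length < m - x.length := by omega
    simp [hlt, List.getElem?_eq_none (by omega : x.length ≤ k)]

theorem pi_interleave_eq (lsts : List (List (List (String × Int)))) :
    pvInterleaveA lsts = pvRoundRobin lsts := by
  unfold pvInterleaveA pvRoundRobin
  simp only []
  have hm : PySem.List.maxD (lsts.map List.length) (fun y => y) 0
      = (PySem.List.max? (lsts.map List.length) (fun y => y)).getD 0 := rfl
  rw [hm]
  set m := (PySem.List.max? (lsts.map List.length) (fun y => y)).getD 0 with hmdef
  have hlen : ∀ x ∈ lsts, x.length ≤ m := by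
    intro x hx
    cases hmax : PySem.List.max? (lsts.map List.length) (fun y => y) with
    | none =>
        rw [PySem.List.max?_eq_none_iff] at hmax
        simp [List.map_eq_nil_iff] at hmax
        simp [hmax] at hx
    | some m0 =>
        have := PySem.List.max?_isMax hmax x.length (List.mem_map_of_mem hx)
        simp [hmdef, hmax]
        exact this
  have hB : (List.range m).foldl (fun ret k =>
      lsts.foldl (fun ret l =>
        match l[k]? with
        | some e => if e.isEmpty then ret else ret ++ [e]
        | none => ret) ret) [] = (List.range m).flatMap (fun k => lsts.flatMap (pvCol k)) := by
    refine pi_fold_app _ _ (fun ret k => ?_) _ _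
    refine pi_fold_app _ (pvCol k) (fun ret l => ?_) _ _
    unfold pvCol
    cases l[k]? with
    | none => simp
    | some e => by_cases he : e.isEmpty <;> simp [he]
  rw [hB, PySem.List.foldl_append_eq_flatMap, List.nil_append, List.filterMap_flatMap]
  apply List.flatMap_congr
  intro k hk
  rw [List.filterMap_map, List.filterMap_eq_flatMap_toList, List.flatMap_map]
  apply List.flatMap_congr
  intro x hx
  exact pi_pad_col m k (List.mem_range.mp hk) x (hlen x hx)

-- ===== VERDICT (by name: the statement is the Claim_ definition above) =====
theorem pi_rr_nil : pvRoundRobin [] = [] := rfl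

theorem priority_interleave_spec : Claim_equal_priority_interleave := by
  intro lsts pr b _ _
  unfold Spec_priority_interleave priority_interleave priority_interleave_alt
  cases pr with
  | none => exact pi_interleave_eq lsts
  | some l =>
      by_cases hl : l.isEmpty
      · simp [hl, pi_interleave_eq]
      · simp only [hl, if_false, Bool.false_eq_true]
        have hsub : ∀ p : String,
            lsts.foldl (fun sub x =>
              match (pvGroupA x).get? p with
              | some g => if g.isEmpty then sub else sub ++ [g]
              | none => sub) [] =
            (lsts.map pvGroupB).filterMap (fun g =>
              match g.get? p with
              | some gl => if gl.isEmpty then none else some gl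
              | none => none) := by
          intro p
          rw [pi_fold_app _ (fun x => match (pvGroupA x).get? p with
              | some g => if g.isEmpty then [] else [g]
              | none => []) (fun ret x => by
                cases hc : (pvGroupA x).get? p with
                | none => simp [hc]
                | some g => by_cases hg : g.isEmpty <;> simp [hc, hg]) lsts [], List.nil_append]
          rw [List.filterMap_map, List.filterMap_eq_flatMap_toList]
          apply List.flatMap_congr
          intro x _
          simp only [Function.comp_apply, pi_group_eq]
          cases hc : (pvGroupA x).get? p with
          | none => simp [hc]
          | some g => by_cases hg : g.isEmpty <;> simp [hc, hg]
        have hstep : (fun (ret : List (List (String × Int))) (k : Int) =>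
            let p := PySem.Int.toStr k
            let sublist := lsts.foldl (fun sub x =>
              match (pvGroupA x).get? p with
              | some g => if g.isEmpty then sub else sub ++ [g]
              | none => sub) []
            if sublist.isEmpty then ret else ret ++ pvInterleaveA sublist)
            = (fun ret p =>
            let sp := PySem.Int.toStr p
            let sub := (lsts.map pvGroupB).filterMap (fun g =>
              match g.get? sp with
              | some gl => if gl.isEmpty then none else some gl
              | none => none)
            ret ++ pvRoundRobin sub) := by
          funext ret k
          simp only [hsub, pi_interleave_eq]
          by_cases hs : ((lsts.map pvGroupB).filterMap (fun g =>
              match g.get? (PySem.Int.toStr k) with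
              | some gl => if gl.isEmpty then none else some gl
              | none => none)).isEmpty
          · simp only [hs, if_true]
            rw [List.isEmpty_iff.mp hs, pi_rr_nil, List.append_nil]
          · simp only [hs, if_false, Bool.false_eq_true]
        rw [hstep]

@[simp] theorem priority_interleave_raises : Claim_raises_priority_interleave := by
  unfold Claim_raises_priority_interleave
  refine ⟨?_, by decide⟩
  intro lsts pr b _ hr
  unfold Raises_priority_interleave at hr
  unfold Pre_priority_interleave
  by_cases ht : pvTruthy pr = true
  · simp only [ht, if_true] at hr ⊢
    obtain ⟨x, hx, he⟩ := hr
    intro h; exact (h x hx) he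
  · simp only [ht] at hr ⊢
    simp_all
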